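-- pv_equiv track=rewrite | github.com/Kosuke-Yamada/verb-sense-clustering | source/preprocessing/extract_exemplars_framenet.py | get_start2index
-- ===== SOURCE A (Python) =====
-- def get_start2index(text):
--     word_count = 0
--     start2index = {0: 0}
--     pre_char = text[0].strip()
--     index = 1
--     for char in text[1:]:
--         char = char.strip()
--         if char != "":
--             if pre_char == "":
--                 word_count += 1
--                 start2index[index] = word_count
--             else:
--                 start2index[index] = word_count
--         pre_char = char
--         index += 1
--     return start2index
-- ===== SOURCE B (Python) =====
-- def get_start2index(text):
--     # Pass 1: blankness flags per position.
--     blank = [c.strip() == "" for c in text]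
--     # Pass 2: word-start increments, then running word counts (prefix sums).
--     inc = [0] + [1 if (not blank[i] and blank[i - 1]) else 0
--                  for i in range(1, len(text))]
--     running = []
--     s = 0
--     for x in inc:
--         s += x
--         running.append(s)
--     # Pass 3: assemble the mapping for non-blank positions.
--     res = {0: 0}
--     for i in range(1, len(text)):
--         if not blank[i]:
--             res[i] = running[i]
--     return res
-- ===== Notes on version B (the rewrite author's own statement) =====
-- stated objective: alternative
-- what changed: Replaces A's single fused loop carrying word_count/pre_char/index state with three separate passes: a blankness-flag pass, a word-start increment list turned into running word counts by prefix sums, and a filtered assembly of the index map.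
import Mathlib
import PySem

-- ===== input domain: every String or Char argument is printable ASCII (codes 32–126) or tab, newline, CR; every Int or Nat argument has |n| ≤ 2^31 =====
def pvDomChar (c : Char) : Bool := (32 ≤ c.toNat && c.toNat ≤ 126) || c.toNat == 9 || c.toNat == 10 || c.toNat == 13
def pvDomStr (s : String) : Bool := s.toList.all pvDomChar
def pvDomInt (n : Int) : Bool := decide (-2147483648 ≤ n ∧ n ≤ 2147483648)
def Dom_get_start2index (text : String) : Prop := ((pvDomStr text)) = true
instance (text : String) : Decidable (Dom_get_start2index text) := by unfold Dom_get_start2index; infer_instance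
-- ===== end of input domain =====

-- B replaces A's single fused stateful loop by three separate passes (blank flags, prefix-summed word counts, filtered assembly); equal results proved on nonempty text.

-- ===== PORT A =====
-- one step of A's `for char in text[1:]` loop; state = (word_count, start2index, pre_char, index)
def stepA (st : Int × PySem.Dict Int Int × String × Int) (ch : Char) :
    Int × PySem.Dict Int Int × String × Int :=
  let wc := st.1; let d := st.2.1; let pre := st.2.2.1; let idx := st.2.2.2
  let c := PySem.Str.strip (String.ofList [ch])
  if c ≠ "" then
    if pre == "" then (wc + 1, d.insert idx (wc + 1), c, idx + 1)
    else (wc, d.insert idx wc, c, idx + 1)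
  else (wc, d, c, idx + 1)

def get_start2index (text : String) : List (Int × Int) :=
  match PySem.Str.pyGet? text 0 with
  | none => []  -- Python raises IndexError on text[0]; excluded by Pre_
  | some c0 =>
    (((PySem.Str.slice text (some 1) none).toList.foldl stepA
        (0, PySem.Dict.ofList [(0, 0)], PySem.Str.strip (String.ofList [c0]), 1)).2.1).items

-- ===== PORT B =====
-- inc[i] = 1 if (not blank[i] and blank[i-1]) else 0
def incOf (blank : List Bool) (i : Int) : Int :=
  if PySem.List.pyGetD blank i true = false ∧ PySem.List.pyGetD blank (i - 1) true = true
  then 1 else 0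

-- one step of B's prefix-sum loop: s += x; running.append(s)
def stepSum (p : Int × List Int) (x : Int) : Int × List Int := (p.1 + x, p.2 ++ [p.1 + x])

-- one step of B's assembly loop: if not blank[i]: res[i] = running[i]
def stepB (blank : List Bool) (running : List Int) (d : PySem.Dict Int Int) (i : Int) :
    PySem.Dict Int Int :=
  if PySem.List.pyGetD blank i true = false
  then d.insert i (PySem.List.pyGetD running i 0) else d

def get_start2index_alt (text : String) : List (Int × Int) :=
  let blank := text.toList.map (fun c => PySem.Str.strip (String.ofList [c]) == "")
  let inc : List Int := 0 :: (PySem.List.pyRange 1 (PySem.Str.len text)).map (incOf blank)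
  let running := (inc.foldl stepSum ((0 : Int), ([] : List Int))).2
  ((PySem.List.pyRange 1 (PySem.Str.len text)).foldl (stepB blank running)
      (PySem.Dict.ofList [(0, 0)])).items

-- ===== PRECONDITION & SPEC =====
-- Pre_ excludes only the empty string, on which A raises IndexError at text[0].
def Pre_get_start2index (text : String) : Prop := text.toList ≠ []
instance (text : String) : Decidable (Pre_get_start2index text) := by
  unfold Pre_get_start2index; infer_instance
def pvWitness_get_start2index : String := "ab c"

def Spec_get_start2index (text : String) (out : List (Int × Int)) : Prop :=
  out = get_start2index_alt text
instance (text : String) (out : List (Int × Int)) : Decidable (Spec_get_start2index text out) := by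
  unfold Spec_get_start2index; infer_instance

-- ===== CLAIM (what is proved, stated in full; the proofs are below) =====
def Claim_equal_get_start2index : Prop :=
  ∀ (text : String), Dom_get_start2index text → Pre_get_start2index text →
    Spec_get_start2index text (get_start2index text)

-- ===== LEMMAS AND PROOFS =====

-- blankness of a single character, as both Pythons compute it
def isB (c : Char) : Bool := PySem.Str.strip (String.ofList [c]) == ""

-- common reference: the entries both loops add for positions idx, idx+1, …
def specE : List Bool → Bool → Int → Int → List (Int × Int)
  | [], _, _, _ => []
  | true :: bs, _, wc, idx => specE bs true wc (idx + 1)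
  | false :: bs, p, wc, idx =>
    if p then (idx, wc + 1) :: specE bs false (wc + 1) (idx + 1)
    else (idx, wc) :: specE bs false wc (idx + 1)

-- prefix sums, as B's loop produces them
def scanAdd (s : Int) : List Int → List Int
  | [] => []
  | x :: l => (s + x) :: scanAdd (s + x) l

lemma foldl_stepSum (l : List Int) : ∀ (s : Int) (acc : List Int),
    (l.foldl stepSum (s, acc)).2 = acc ++ scanAdd s l := by
  induction l with
  | nil => intro s acc; simp [scanAdd]
  | cons x l ih => intro s acc; simp [stepSum, scanAdd, ih]

lemma scanAdd_getD (l : List Int) : ∀ (s : Int) (i : Nat), i < l.length →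
    (scanAdd s l).getD i 0 = s + (l.take (i + 1)).sum := by
  induction l with
  | nil => intro s i h; simp at h
  | cons x l ih =>
    intro s i h
    cases i with
    | zero => simp [scanAdd]
    | succ j =>
      have hj : j < l.length := by simpa using h
      have h2 := ih (s + x) j hj
      simp only [scanAdd, List.getD_cons_succ, List.take_succ_cons, List.sum_cons, h2]
      ring

lemma A_fold : ∀ (rest : List Char) (wc idx : Int) (pre : String) (d : PySem.Dict Int Int),
    (∀ x ∈ d.keys, x < idx) →
    ((rest.foldl stepA (wc, d, pre, idx)).2.1).items
      = d.items ++ specE (rest.map isB) (pre == "") wc idx := by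
  intro rest
  induction rest with
  | nil => intro wc idx pre d hk; simp [specE]
  | cons c rest ih =>
    intro wc idx pre d hk
    by_cases hc : PySem.Str.strip (String.ofList [c]) = ""
    · have hA : stepA (wc, d, pre, idx) c
          = (wc, d, PySem.Str.strip (String.ofList [c]), idx + 1) := by
        simp [stepA, hc]
      rw [List.foldl_cons, hA,
        ih wc (idx + 1) _ d (fun x hx => lt_trans (hk x hx) (by omega))]
      simp [specE, isB, hc]
    · have hcont : d.contains idx = false := by
        rcases Bool.eq_false_or_eq_true (d.contains idx) with h | h
        · exact absurd (hk idx ((PySem.Dict.contains_iff_mem_keys d idx).1 h)) (lt_irrefl idx)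
        · exact h
      have hkeys : ∀ (v : Int) (x : Int), x ∈ (d.insert idx v).keys → x < idx + 1 := by
        intro v x hx
        rw [PySem.Dict.keys_insert_of_not_contains d v hcont] at hx
        rcases List.mem_append.1 hx with h | h
        · exact lt_trans (hk x h) (by omega)
        · simp at h; omega
      by_cases hp : pre = ""
      · have hA : stepA (wc, d, pre, idx) c
            = (wc + 1, d.insert idx (wc + 1), PySem.Str.strip (String.ofList [c]), idx + 1) := by
          simp [stepA, hc, hp]
        rw [List.foldl_cons, hA,
          ih (wc + 1) (idx + 1) _ (d.insert idx (wc + 1)) (hkeys (wc + 1)),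
          PySem.Dict.items_insert_of_not_contains d _ hcont]
        have hbeq : (PySem.Str.strip (String.ofList [c]) == "") = false := by simp [hc]
        simp [isB, hbeq, specE, hp]
      · have hA : stepA (wc, d, pre, idx) c
            = (wc, d.insert idx wc, PySem.Str.strip (String.ofList [c]), idx + 1) := by
          simp [stepA, hc, hp]
        rw [List.foldl_cons, hA,
          ih wc (idx + 1) _ (d.insert idx wc) (hkeys wc),
          PySem.Dict.items_insert_of_not_contains d _ hcont]
        have hbeq : (PySem.Str.strip (String.ofList [c]) == "") = false := by simp [hc]
        have hpeq : (pre == "") = false := by simp [hp]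
        simp [isB, hbeq, specE, hpeq]

lemma B_fold (bs : List Bool) (running : List Int) (n : Nat) (hn : n = bs.length)
    (hstep : ∀ k : Nat, 1 ≤ k → k < n →
      running.getD k 0 = running.getD (k - 1) 0 +
        (if bs.getD k true = false ∧ bs.getD (k - 1) true = true then 1 else 0)) :
    ∀ (j k : Nat) (d : PySem.Dict Int Int), j = n - k → 1 ≤ k →
      (∀ x ∈ d.keys, x < (k : Int)) →
      ((PySem.List.pyRange (k : Int) (n : Int)).foldl (stepB bs running) d).items
        = d.items ++ specE (bs.drop k) (bs.getD (k - 1) true) (running.getD (k - 1) 0) (k : Int) := by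
  intro j
  induction j with
  | zero =>
    intro k d hj h1 hk
    rw [PySem.List.pyRange_one_eq_nil (by exact_mod_cast (by omega : n ≤ k)),
      List.drop_eq_nil_of_le (by omega)]
    simp [specE]
  | succ j ih =>
    intro k d hj h1 hk
    have hkn : k < n := by omega
    have hkb : k < bs.length := by omega
    have hdrop : bs.drop k = bs[k] :: bs.drop (k + 1) := List.drop_eq_getElem_cons hkb
    have hgetD : bs.getD k true = bs[k] := List.getD_eq_getElem bs true hkb
    have hstepk := hstep k h1 hkn
    have hcast : ((k : Int) + 1) = (((k + 1 : Nat)) : Int) := by push_cast; ring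
    have hksub : k + 1 - 1 = k := by omega
    rw [PySem.List.pyRange_one_cons (by exact_mod_cast hkn), List.foldl_cons]
    have hq : bs[k]? = some bs[k] := List.getElem?_eq_getElem hkb
    by_cases hb : bs[k] = true
    · have hB : stepB bs running d (k : Int) = d := by
        simp [stepB, PySem.List.pyGetD_natCast, hq, hb]
      have hrun0 : running.getD k 0 = running.getD (k - 1) 0 := by
        rw [hstepk, hgetD, hb]; simp
      rw [hB, hcast, ih (k + 1) d (by omega) (by omega)
        (fun x hx => lt_trans (hk x hx) (by push_cast; omega)),
        hksub, hdrop, hb]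
      simp only [specE]
      rw [hgetD, hb, hrun0, ← hcast]
    · have hbf : bs[k] = false := by simpa using hb
      have hcont : d.contains (k : Int) = false := by
        rcases Bool.eq_false_or_eq_true (d.contains (k : Int)) with h | h
        · exact absurd (hk _ ((PySem.Dict.contains_iff_mem_keys d _).1 h)) (lt_irrefl _)
        · exact h
      have hB : stepB bs running d (k : Int)
          = d.insert (k : Int) (running.getD k 0) := by
        simp [stepB, PySem.List.pyGetD_natCast, hq, hbf]
      have hkeys : ∀ x ∈ (d.insert (k : Int) (running.getD k 0)).keys, x < ((k + 1 : Nat) : Int) := by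
        intro x hx
        rw [PySem.Dict.keys_insert_of_not_contains d _ hcont] at hx
        rcases List.mem_append.1 hx with h | h
        · exact lt_trans (hk x h) (by push_cast; omega)
        · simp at h; rw [h]; push_cast; omega
      have hrun : running.getD k 0 = running.getD (k - 1) 0 +
          (if bs.getD (k - 1) true = true then 1 else 0) := by
        rw [hstepk, hgetD, hbf]; simp
      rw [hB, hcast, ih (k + 1) _ (by omega) (by omega) hkeys, hksub,
        PySem.Dict.items_insert_of_not_contains d _ hcont, hdrop, hgetD, hbf]
      simp only [specE]
      by_cases hp : bs.getD (k - 1) true = true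
      · have hrun1 : running.getD k 0 = running.getD (k - 1) 0 + 1 := by
          rw [hrun, hp]; simp
        rw [hp, if_pos rfl, hrun1, ← hcast]
        simp
      · have hpf : bs.getD (k - 1) true = false := by simpa using hp
        have hrun1 : running.getD k 0 = running.getD (k - 1) 0 := by
          rw [hrun, hpf]; simp
        rw [hpf, if_neg (by simp), hrun1, ← hcast]
        simp

lemma run_step (bs : List Bool) (n : Nat) (hn : n = bs.length) :
    ∀ k : Nat, 1 ≤ k → k < n →
      (scanAdd 0 (0 :: (PySem.List.pyRange 1 (n : Int)).map (incOf bs))).getD k 0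
        = (scanAdd 0 (0 :: (PySem.List.pyRange 1 (n : Int)).map (incOf bs))).getD (k - 1) 0 +
          (if bs.getD k true = false ∧ bs.getD (k - 1) true = true then 1 else 0) := by
  intro k h1 hk
  have hlen : (0 :: (PySem.List.pyRange 1 (n : Int)).map (incOf bs)).length = n := by
    simp [PySem.List.length_pyRange_one]; omega
  have hk' : k < (0 :: (PySem.List.pyRange 1 (n : Int)).map (incOf bs)).length := by omega
  rw [scanAdd_getD _ 0 k (by omega), scanAdd_getD _ 0 (k - 1) (by omega),
    show k - 1 + 1 = k from Nat.sub_add_cancel h1, List.sum_take_succ _ k hk']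
  rcases k with _ | j
  · omega
  · have hj : j < ((PySem.List.pyRange 1 (n : Int)).map (incOf bs)).length := by
      simpa using (by omega : j + 1 < (0 :: (PySem.List.pyRange 1 (n : Int)).map (incOf bs)).length)
    have hj2 : j < (PySem.List.pyRange 1 (n : Int)).length := by simpa using hj
    have hval : (0 :: (PySem.List.pyRange 1 (n : Int)).map (incOf bs))[j + 1]'hk'
        = incOf bs (1 + (j : Int)) := by
      simp [PySem.List.getElem_pyRange_one 1 (n : Int) j hj2]
    rw [hval]
    have hc1 : (1 + (j : Int)) = ((j + 1 : Nat) : Int) := by push_cast; ring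
    have hc2 : ((j + 1 : Nat) : Int) - 1 = ((j : Nat) : Int) := by push_cast; ring
    simp only [incOf, hc1, hc2, PySem.List.pyGetD_natCast]
    ring_nf
    simp

lemma A_eq (text : String) (c0 : Char) (rest : List Char) (h : text.toList = c0 :: rest) :
    get_start2index text = [(0, 0)] ++ specE (rest.map isB) (isB c0) 0 1 := by
  have h0 : PySem.Str.pyGet? text 0 = some c0 := by
    rw [show ((0 : Int)) = ((0 : Nat) : Int) from rfl, PySem.Str.pyGet?_natCast, h]; rfl
  have hsl : (PySem.Str.slice text (some 1) none).toList = rest := by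
    rw [PySem.Str.toList_slice, h]; exact PySem.List.slice_from_one _
  have hkey : ∀ x ∈ (PySem.Dict.ofList [((0 : Int), (0 : Int))]).keys, x < 1 := by
    intro x hx
    rw [show (PySem.Dict.ofList [((0 : Int), (0 : Int))]).keys = [0] from rfl] at hx
    simp at hx; omega
  rw [get_start2index, h0, hsl]
  exact (A_fold rest 0 1 (PySem.Str.strip (String.ofList [c0]))
    (PySem.Dict.ofList [(0, 0)]) hkey).trans rfl

lemma B_eq (text : String) (c0 : Char) (rest : List Char) (h : text.toList = c0 :: rest) :
    get_start2index_alt text = [(0, 0)] ++ specE (rest.map isB) (isB c0) 0 1 := by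
  have hn : PySem.Str.len text = ((rest.length + 1 : Nat) : Int) := by
    rw [PySem.Str.len_eq, h]; push_cast; simp
  have hbs : text.toList.map (fun c => PySem.Str.strip (String.ofList [c]) == "")
      = (c0 :: rest).map isB := by rw [h]; rfl
  have hkey : ∀ x ∈ (PySem.Dict.ofList [((0 : Int), (0 : Int))]).keys, x < ((1 : Nat) : Int) := by
    intro x hx
    rw [show (PySem.Dict.ofList [((0 : Int), (0 : Int))]).keys = [0] from rfl] at hx
    simp at hx; omega
  have hnlen : rest.length + 1 = ((c0 :: rest).map isB).length := by simp
  rw [get_start2index_alt]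
  simp only [hbs, hn, foldl_stepSum, List.nil_append]
  exact (B_fold ((c0 :: rest).map isB) _ (rest.length + 1) hnlen
    (run_step ((c0 :: rest).map isB) (rest.length + 1) hnlen)
    (rest.length + 1 - 1) 1 _ rfl le_rfl hkey).trans rfl
-- ===== VERDICT (by name: the statement is the Claim_ definition above) =====
theorem get_start2index_spec : Claim_equal_get_start2index := by
  intro text _ hpre
  unfold Spec_get_start2index
  rcases hx : text.toList with _ | ⟨c0, rest⟩
  · exact absurd hx hpre
  · rw [A_eq text c0 rest hx, B_eq text c0 rest hx]
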